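-- pv_equiv track=rewrite | github.com/raeez/chiral-bar-cobar | compute/lib/en_bar_coproduct_engine.py | necklace_polynomial
-- ===== SOURCE A (Python) =====
-- def mobius(n: int) -> int:
--     """Mobius function mu(n), public interface."""
--     if n <= 0:
--         raise ValueError(f"Mobius function undefined for n={n}")
--     if n == 1:
--         return 1
--     # Trial division for squarefreeness and prime count
--     temp = n
--     num_primes = 0
--     d = 2
--     while d * d <= temp:
--         if temp % d == 0:
--             num_primes += 1
--             temp //= d
--             if temp % d == 0:
--                 return 0  # d^2 divides n
--         d += 1
--     if temp > 1:
--         num_primes += 1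
--     return (-1) ** num_primes
--
-- def necklace_polynomial(n: int, d: int) -> int:
--     r"""Number of aperiodic necklaces of length n with d colors.
--
--     N(n, d) = (1/n) * sum_{j | n} mu(n/j) * d^j
--
--     This equals dim(Lie^c(n) tensor_{S_n} V^{tensor n}) for dim(V) = d.
--     = dim of arity-n part of the free Lie algebra on d generators.
--     """
--     if n == 0:
--         return 1
--     if n == 1:
--         return d
--     total = 0
--     for j in range(1, n + 1):
--         if n % j == 0:
--             total += mobius(n // j) * d ** j
--     return total // n
-- ===== SOURCE B (Python) =====
-- def necklace_polynomial(n: int, d: int) -> int: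
--     """Number of aperiodic necklaces of length n with d colors, by
--     inclusion-exclusion over the distinct prime factors of n."""
--     if n == 0:
--         return 1
--     if n == 1:
--         return d
--     if n < 0:
--         return 0
--     # distinct prime factors of n by a single trial division
--     primes = []
--     m = n
--     p = 2
--     while p * p <= m:
--         if m % p == 0:
--             primes.append(p)
--             while m % p == 0:
--                 m //= p
--         p += 1
--     if m > 1:
--         primes.append(m)
--     # squarefree divisors of n = products over subsets of `primes`, with sign
--     terms = [(1, 1)]  # (sign, squarefree divisor)
--     for p in primes:
--         terms = terms + [(-s, q * p) for (s, q) in terms]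
--     total = sum(s * d ** (n // q) for (s, q) in terms)
--     return total // n
-- ===== Notes on version B (the rewrite author's own statement) =====
-- stated objective: faster
-- what changed: Instead of scanning every j in 1..n and recomputing the Mobius function by trial division for each divisor, B factors n once by trial division and sums d**(n//q) with sign (-1)^k over the squarefree divisors q generated as subset products of the distinct primes (inclusion-exclusion), then floor-divides by n.
import Mathlib
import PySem

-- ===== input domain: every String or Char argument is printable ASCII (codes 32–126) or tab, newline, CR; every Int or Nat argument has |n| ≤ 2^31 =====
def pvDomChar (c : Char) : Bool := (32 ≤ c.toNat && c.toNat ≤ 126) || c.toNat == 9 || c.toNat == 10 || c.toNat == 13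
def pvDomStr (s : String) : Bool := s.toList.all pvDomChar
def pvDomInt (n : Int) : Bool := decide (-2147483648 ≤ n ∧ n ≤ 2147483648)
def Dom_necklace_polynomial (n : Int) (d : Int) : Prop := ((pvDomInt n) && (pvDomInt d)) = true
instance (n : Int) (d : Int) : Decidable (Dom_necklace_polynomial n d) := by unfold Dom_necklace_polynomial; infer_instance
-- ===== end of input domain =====

-- B replaces A's scan of every j in 1..n (with a trial-division Mobius evaluation per divisor)
-- by a single factorization of n and an inclusion-exclusion sum over subsets of its distinct
-- primes (objective: faster).


-- ===== PORT A =====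
-- the `while d * d <= temp` loop of A's `mobius`, with fuel (the fuel passed below is always sufficient)
def mobiusLoop (fuel : Nat) (temp : Int) (num_primes : Nat) (d : Int) : Int :=
  match fuel with
  | 0 => 0
  | fuel + 1 =>
    if d * d ≤ temp then
      if PySem.Int.mod temp d == 0 then
        -- num_primes += 1; temp //= d; if temp % d == 0: return 0
        if PySem.Int.mod (PySem.Int.floordiv temp d) d == 0 then 0
        else mobiusLoop fuel (PySem.Int.floordiv temp d) (num_primes + 1) (d + 1)
      else mobiusLoop fuel temp num_primes (d + 1)
    else if 1 < temp then (-1 : Int) ^ (num_primes + 1) else (-1 : Int) ^ num_primes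

-- A's helper `mobius`; on n ≤ 0 Python raises ValueError — that branch is unreachable from
-- `necklace_polynomial` (it is only called on positive divisors), the port returns 0 there
def mobiusA (n : Int) : Int :=
  if n ≤ 0 then 0
  else if n == 1 then 1
  else mobiusLoop (n.toNat + 2) n 0 2

def necklace_polynomial (n : Int) (d : Int) : Int :=
  if n == 0 then 1
  else if n == 1 then d
  else
    PySem.Int.floordiv
      ((PySem.List.pyRange 1 (n + 1) 1).foldl
        (fun total j =>
          if PySem.Int.mod n j == 0 then
            total + mobiusA (PySem.Int.floordiv n j) * d ^ j.toNat
          else total) 0)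
      n

-- ===== PORT B =====
-- B's inner `while m % p == 0: m //= p`, with fuel (the fuel passed below is always sufficient)
def stripLoop (fuel : Nat) (m p : Int) : Int :=
  match fuel with
  | 0 => m
  | fuel + 1 =>
    if PySem.Int.mod m p == 0 then stripLoop fuel (PySem.Int.floordiv m p) p else m

-- B's outer `while p * p <= m` trial-division loop, returning the final m and the prime list
def factorLoop (fuel : Nat) (m p : Int) (primes : List Int) : Int × List Int :=
  match fuel with
  | 0 => (m, primes)
  | fuel + 1 =>
    if p * p ≤ m then
      if PySem.Int.mod m p == 0 then
        factorLoop fuel (stripLoop (m.toNat + 1) m p) (p + 1) (primes ++ [p])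
      else factorLoop fuel m (p + 1) primes
    else (m, primes)

def necklace_polynomial_alt (n : Int) (d : Int) : Int :=
  if n == 0 then 1
  else if n == 1 then d
  else if n < 0 then 0
  else
    let mp := factorLoop (n.toNat + 2) n 2 []
    let primes := if 1 < mp.1 then mp.2 ++ [mp.1] else mp.2
    let terms := primes.foldl
      (fun terms p => terms ++ terms.map (fun sq : Int × Int => (-sq.1, sq.2 * p))) [(1, 1)]
    PySem.Int.floordiv
      ((terms.map (fun sq : Int × Int => sq.1 * d ^ (PySem.Int.floordiv n sq.2).toNat)).sum)
      n

-- ===== PRECONDITION & SPEC =====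
def Spec_necklace_polynomial (n : Int) (d : Int) (out : Int) : Prop := out = necklace_polynomial_alt n d
instance (n : Int) (d : Int) (out : Int) : Decidable (Spec_necklace_polynomial n d out) := by unfold Spec_necklace_polynomial; infer_instance

-- ===== CLAIM (what is proved, stated in full; the proofs are below) =====
def Claim_equal_necklace_polynomial : Prop := ∀ (n : Int) (d : Int), Dom_necklace_polynomial n d → Spec_necklace_polynomial n d (necklace_polynomial n d)

-- ===== LEMMAS AND PROOFS =====

-- a divisor dd ≥ 2 of t that is ≤ every prime factor of t is itself prime
theorem prime_of_le_primeFactors (t dd : Nat) (hd : 2 ≤ dd)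
    (hfac : ∀ p : Nat, p.Prime → p ∣ t → dd ≤ p) (hdvd : dd ∣ t) : dd.Prime := by
  have hq : dd.minFac.Prime := Nat.minFac_prime (by omega)
  have h1 : dd ≤ dd.minFac := hfac _ hq ((Nat.minFac_dvd dd).trans hdvd)
  have h2 : dd.minFac ≤ dd := Nat.minFac_le (by omega)
  have : dd.minFac = dd := le_antisymm h2 h1
  rwa [← this]

-- A's trial-division loop computes (-1)^k · μ(t), given that all prime factors of t are ≥ dd
theorem mobiusLoop_spec (fuel t k dd : Nat) (ht : 1 ≤ t) (hd : 2 ≤ dd)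
    (hfac : ∀ p : Nat, p.Prime → p ∣ t → dd ≤ p)
    (hfuel : t + 2 ≤ fuel + dd) (hfuel1 : 1 ≤ fuel) :
    mobiusLoop fuel (t : Int) k (dd : Int) = (-1) ^ k * ArithmeticFunction.moebius t := by
  induction fuel generalizing t k dd with
  | zero => omega
  | succ fuel ih =>
    rw [mobiusLoop]
    by_cases hguard : dd * dd ≤ t
    · rw [if_pos (by exact_mod_cast hguard)]
      have hmodc : PySem.Int.mod (t : Int) (dd : Int) = ((t % dd : Nat) : Int) :=
        PySem.Int.mod_natCast t dd
      by_cases hdvd : dd ∣ t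
      · have hpr : dd.Prime := prime_of_le_primeFactors t dd hd hfac hdvd
        rw [if_pos (by rw [hmodc, Nat.mod_eq_zero_of_dvd hdvd]; rfl), PySem.Int.floordiv_natCast]
        have hmodc2 : PySem.Int.mod ((t / dd : Nat) : Int) (dd : Int) = ((t / dd % dd : Nat) : Int) :=
          PySem.Int.mod_natCast _ dd
        by_cases hdvd2 : dd ∣ t / dd
        · rw [if_pos (by rw [hmodc2, Nat.mod_eq_zero_of_dvd hdvd2]; rfl)]
          have hsq : dd * dd ∣ t := by
            obtain ⟨s, hs⟩ := hdvd2
            exact ⟨s, by rw [Nat.eq_mul_of_div_eq_right hdvd hs]; ring⟩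
          have hnsf : ¬ Squarefree t := fun h => by
            have := h dd hsq
            exact Nat.Prime.one_lt hpr |>.ne' (Nat.isUnit_iff.1 this)
          rw [ArithmeticFunction.moebius_eq_zero_of_not_squarefree hnsf, mul_zero]
        · have h0 : t / dd % dd ≠ 0 := fun h => hdvd2 (Nat.dvd_of_mod_eq_zero h)
          rw [if_neg (by rw [hmodc2]; simp only [beq_iff_eq, Int.natCast_eq_zero]; exact h0)]
          have ht' : 1 ≤ t / dd := Nat.one_le_div_iff (by omega) |>.2 (Nat.le_of_dvd (by omega) hdvd)
          have hfac' : ∀ p : Nat, p.Prime → p ∣ t / dd → dd + 1 ≤ p := by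
            intro p hp hpd
            have h1 : dd ≤ p := hfac p hp (hpd.trans (Nat.div_dvd_of_dvd hdvd))
            have h2 : p ≠ dd := fun h => hdvd2 (h ▸ hpd)
            omega
          have hle : t / dd ≤ t := Nat.div_le_self t dd
          have := ih (t / dd) (k + 1) (dd + 1) ht' (by omega) hfac' (by omega)
            (by nlinarith)
          push_cast at this ⊢
          rw [this]
          have hcop : Nat.Coprime dd (t / dd) := (Nat.Prime.coprime_iff_not_dvd hpr).2 hdvd2
          have hmul : ArithmeticFunction.moebius t
              = ArithmeticFunction.moebius dd * ArithmeticFunction.moebius (t / dd) := by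
            rw [← ArithmeticFunction.isMultiplicative_moebius.map_mul_of_coprime hcop,
              Nat.mul_div_cancel' hdvd]
          rw [hmul, ArithmeticFunction.moebius_apply_prime hpr]
          ring
      · have h0 : t % dd ≠ 0 := fun h => hdvd (Nat.dvd_of_mod_eq_zero h)
        rw [if_neg (by rw [hmodc]; simp only [beq_iff_eq, Int.natCast_eq_zero]; exact h0)]
        have hfac' : ∀ p : Nat, p.Prime → p ∣ t → dd + 1 ≤ p := by
          intro p hp hpd
          have h1 : dd ≤ p := hfac p hp hpd
          have h2 : p ≠ dd := fun h => hdvd (h ▸ hpd)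
          omega
        have := ih t k (dd + 1) ht (by omega) hfac' (by omega) (by nlinarith)
        push_cast at this ⊢
        exact this
    · rw [if_neg (by exact_mod_cast hguard)]
      by_cases h1 : 1 < t
      · rw [if_pos (by exact_mod_cast h1)]
        have hpr : t.Prime := by
          by_contra hnp
          have hq : t.minFac.Prime := Nat.minFac_prime (by omega)
          have hdq : dd ≤ t.minFac := hfac _ hq (Nat.minFac_dvd t)
          have hsq : t.minFac ^ 2 ≤ t := Nat.minFac_sq_le_self (by omega) hnp
          nlinarith
        rw [ArithmeticFunction.moebius_apply_prime hpr]
        ring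
      · rw [if_neg (by exact_mod_cast h1)]
        have : t = 1 := by omega
        subst this
        simp

-- A's `mobius` is the Moebius function on positive arguments
theorem mobiusA_spec (m : Nat) (hm : 1 ≤ m) :
    mobiusA (m : Int) = ArithmeticFunction.moebius m := by
  rw [mobiusA]
  rcases Nat.lt_or_ge m 2 with h2 | h2
  · have : m = 1 := by omega
    subst this
    norm_num
  · rw [if_neg (by simp; omega), if_neg (by simp; omega)]
    have := mobiusLoop_spec (m + 2) m 0 2 (by omega) (by omega)
      (fun p hp _ => hp.two_le) (by omega) (by omega)
    simpa using this

-- B's strip loop divides out all factors p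
theorem stripLoop_spec (fuel m p : Nat) (hm : 1 ≤ m) (hp : 2 ≤ p) (hfuel : m ≤ fuel) :
    ∃ (k r : Nat), stripLoop fuel (m : Int) (p : Int) = (r : Int) ∧
      m = p ^ k * r ∧ ¬ p ∣ r ∧ 1 ≤ r := by
  induction fuel generalizing m with
  | zero => omega
  | succ fuel ih =>
    rw [stripLoop]
    have hmodc : PySem.Int.mod (m : Int) (p : Int) = ((m % p : Nat) : Int) :=
      PySem.Int.mod_natCast m p
    by_cases hdvd : p ∣ m
    · have hmod : PySem.Int.mod (m : Int) (p : Int) == 0 := by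
        rw [hmodc, Nat.mod_eq_zero_of_dvd hdvd]; rfl
      rw [if_pos hmod, PySem.Int.floordiv_natCast]
      have hlt : m / p < m := Nat.div_lt_self (by omega) (by omega)
      have hm' : 1 ≤ m / p := Nat.one_le_div_iff (by omega) |>.2 (Nat.le_of_dvd (by omega) hdvd)
      obtain ⟨k, r, heq, hfac, hnd, hr⟩ := ih (m / p) hm' (by omega)
      refine ⟨k + 1, r, heq, ?_, hnd, hr⟩
      calc m = p * (m / p) := by rw [Nat.mul_div_cancel' hdvd]
        _ = p * (p ^ k * r) := by rw [← hfac]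
        _ = p ^ (k + 1) * r := by ring
    · have hmod : ¬ (PySem.Int.mod (m : Int) (p : Int) == 0) := by
        rw [hmodc]
        have h0 : m % p ≠ 0 := fun h => hdvd (Nat.dvd_of_mod_eq_zero h)
        simp only [beq_iff_eq, Int.natCast_eq_zero]
        exact h0
      rw [if_neg hmod]
      exact ⟨0, m, rfl, by ring, hdvd, hm⟩

-- B's factor loop: the list it builds (with the leftover m appended when > 1) is a strictly
-- increasing list of primes whose underlying finset is exactly m.primeFactors
theorem factorLoop_spec (fuel m p : Nat) (acc : List Int) (hm : 1 ≤ m) (hp : 2 ≤ p)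
    (hfac : ∀ q : Nat, q.Prime → q ∣ m → p ≤ q)
    (hfuel : m + 2 ≤ fuel + p) (hfuel1 : 1 ≤ fuel) :
    ∃ (qs : List Nat) (mf : Nat),
      factorLoop fuel (m : Int) (p : Int) acc = ((mf : Int), acc ++ qs.map (Nat.cast)) ∧
      (qs ++ if 1 < mf then [mf] else []).Pairwise (· < ·) ∧
      (∀ q ∈ (qs ++ if 1 < mf then [mf] else []), q.Prime ∧ p ≤ q) ∧
      (qs ++ if 1 < mf then [mf] else []).toFinset = m.primeFactors := by
  induction fuel generalizing m p acc with
  | zero => omega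
  | succ fuel ih =>
    rw [factorLoop]
    by_cases hguard : p * p ≤ m
    · rw [if_pos (by exact_mod_cast hguard)]
      have hmodc : PySem.Int.mod (m : Int) (p : Int) = ((m % p : Nat) : Int) :=
        PySem.Int.mod_natCast m p
      by_cases hdvd : p ∣ m
      · have hpr : p.Prime := prime_of_le_primeFactors m p hp hfac hdvd
        rw [if_pos (by rw [hmodc, Nat.mod_eq_zero_of_dvd hdvd]; rfl)]
        have htn : ((m : Int)).toNat = m := Int.toNat_natCast m
        rw [htn]
        obtain ⟨k, r, hstrip, hmkr, hnd, hr⟩ := stripLoop_spec (m + 1) m p hm hp (by omega)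
        rw [hstrip]
        have hk : 1 ≤ k := by
          by_contra hk0
          have : k = 0 := by omega
          subst this
          simp at hmkr
          exact hnd (hmkr ▸ hdvd)
        have hrle : r ≤ m := by
          calc r ≤ p ^ k * r := Nat.le_mul_of_pos_left r (by positivity)
            _ = m := hmkr.symm
        have hfac' : ∀ q : Nat, q.Prime → q ∣ r → p + 1 ≤ q := by
          intro q hq hqd
          have h1 : p ≤ q := hfac q hq (hqd.trans ⟨p ^ k, by rw [hmkr]; ring⟩)
          have h2 : q ≠ p := fun h => hnd (h ▸ hqd)
          omega
        obtain ⟨qs, mf, heq, hpw, hqprime, hfin⟩ :=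
          ih r (p + 1) (acc ++ [(p : Int)]) hr (by omega) hfac' (by omega) (by nlinarith)
        refine ⟨p :: qs, mf, ?_, ?_, ?_, ?_⟩
        · push_cast at heq ⊢
          rw [heq, List.append_assoc]
          rfl
        · rw [List.cons_append, List.pairwise_cons]
          exact ⟨fun q hq => by have := (hqprime q hq).2; omega, hpw⟩
        · intro q hq
          rw [List.cons_append, List.mem_cons] at hq
          rcases hq with h | h
          · exact ⟨h ▸ hpr, h ▸ le_refl p⟩
          · obtain ⟨h1, h2⟩ := hqprime q h
            exact ⟨h1, by omega⟩
        · rw [List.cons_append, List.toFinset_cons, hfin]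
          have hm0 : m = p ^ k * r := hmkr
          rw [hm0, Nat.primeFactors_mul (by positivity) (by omega),
            Nat.primeFactors_pow _ (by omega), hpr.primeFactors]
          ext x
          simp
      · have h0 : m % p ≠ 0 := fun h => hdvd (Nat.dvd_of_mod_eq_zero h)
        rw [if_neg (by rw [hmodc]; simp only [beq_iff_eq, Int.natCast_eq_zero]; exact h0)]
        have hfac' : ∀ q : Nat, q.Prime → q ∣ m → p + 1 ≤ q := by
          intro q hq hqd
          have h1 : p ≤ q := hfac q hq hqd
          have h2 : q ≠ p := fun h => hdvd (h ▸ hqd)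
          omega
        obtain ⟨qs, mf, heq, hpw, hqprime, hfin⟩ :=
          ih m (p + 1) acc hm (by omega) hfac' (by omega) (by nlinarith)
        refine ⟨qs, mf, by push_cast at heq ⊢; exact heq, hpw, ?_, hfin⟩
        intro q hq
        obtain ⟨h1, h2⟩ := hqprime q hq
        exact ⟨h1, by omega⟩
    · rw [if_neg (by exact_mod_cast hguard)]
      have hpr : 1 < m → Nat.Prime m := by
        intro h1
        by_contra hnp
        have hq3 : Nat.Prime (Nat.minFac m) := Nat.minFac_prime (by omega)
        have hdq : p ≤ Nat.minFac m := hfac _ hq3 (Nat.minFac_dvd m)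
        have hsq : Nat.minFac m ^ 2 ≤ m := Nat.minFac_sq_le_self (by omega) hnp
        nlinarith
      refine ⟨[], m, by simp, ?_, ?_, ?_⟩
      · by_cases h1 : 1 < m <;> simp [h1]
      · intro q hq
        by_cases h1 : 1 < m
        · simp only [h1, if_true, List.nil_append, List.mem_singleton] at hq
          exact hq ▸ ⟨hpr h1, hfac m (hpr h1) dvd_rfl⟩
        · simp [h1] at hq
      · by_cases h1 : 1 < m
        · simp [h1, (hpr h1).primeFactors]
        · have : m = 1 := by omega
          subst this
          simp

-- the Moebius function of a product of distinct primes
theorem moebius_prod_primes (T : Finset Nat) (hT : ∀ p ∈ T, p.Prime) :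
    ArithmeticFunction.moebius (∏ x ∈ T, x) = (-1) ^ T.card := by
  induction T using Finset.induction_on with
  | empty => simp
  | insert p s hps ih =>
    rw [Finset.prod_insert hps, Finset.card_insert_of_notMem hps]
    have hp : p.Prime := hT p (Finset.mem_insert_self p s)
    have hs : ∀ q ∈ s, Nat.Prime q := fun q hq => hT q (Finset.mem_insert_of_mem hq)
    have hcop : Nat.Coprime p (∏ x ∈ s, x) := by
      rw [Nat.Prime.coprime_iff_not_dvd hp, Prime.dvd_finset_prod_iff hp.prime]
      rintro ⟨q, hq, hpq⟩
      exact hps (((Nat.prime_dvd_prime_iff_eq hp (hs q hq)).1 hpq) ▸ hq)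
    rw [ArithmeticFunction.isMultiplicative_moebius.map_mul_of_coprime hcop,
      ArithmeticFunction.moebius_apply_prime hp, ih hs]
    ring

-- the doubling fold of B enumerates (sign, product) over all sublists of the prime list
theorem termsFold_eq (P : List Nat) :
    (P.map (Nat.cast : Nat → Int)).foldl
      (fun terms p => terms ++ terms.map (fun sq : Int × Int => (-sq.1, sq.2 * p))) [(1, 1)]
    = P.sublists.map (fun S => ((-1 : Int) ^ S.length, (S.prod : Int))) := by
  induction P using List.reverseRecOn with
  | nil => simp
  | append_singleton P p ih =>
    rw [List.map_append, List.foldl_append, ih, List.sublists_concat, List.map_append]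
    simp only [List.map_singleton, List.foldl_cons, List.foldl_nil, List.map_map]
    congr 1
    apply List.map_congr_left
    intro S hS
    simp [Function.comp, pow_succ, mul_comm]

-- a sum of a (length, product)-function over sublists of a duplicate-free list is the
-- corresponding sum over the powerset of its finset
theorem sum_sublists_eq_powerset (P : List Nat) (hnd : P.Nodup) (G : Nat → Nat → Int) :
    (P.sublists.map (fun S => G S.length S.prod)).sum
      = ∑ T ∈ P.toFinset.powerset, G T.card (∏ x ∈ T, x) := by
  induction P using List.reverseRecOn generalizing G with
  | nil => simp
  | append_singleton P p ih =>
    rw [List.sublists_concat, List.map_append, List.sum_append, List.map_map]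
    have hnd' : P.Nodup := (List.nodup_append.1 hnd).1
    have hp : p ∉ P := by
      simp [List.nodup_append] at hnd
      tauto
    have hfin : (P ++ [p]).toFinset = insert p P.toFinset := by
      simp
    have hmap : List.map ((fun S => G S.length S.prod) ∘ fun x => x ++ [p]) P.sublists
        = List.map (fun S => G (S.length + 1) (S.prod * p)) P.sublists := by
      apply List.map_congr_left
      intro S hS
      simp
    rw [hfin, Finset.sum_powerset_insert (by simpa using hp), hmap,
      ih hnd' G, ih hnd' (fun c q => G (c + 1) (q * p))]
    congr 1
    apply Finset.sum_congr rfl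
    intro T hT
    have hpT : p ∉ T := fun h => (by simpa using hp : p ∉ P.toFinset) (Finset.mem_powerset.1 hT h)
    rw [Finset.prod_insert hpT, Finset.card_insert_of_notMem hpT, mul_comm]

-- A's accumulation loop is the Moebius-weighted sum over the divisors of n
theorem totalA_eq (n' : Nat) (hn : 1 ≤ n') (d : Int) :
    (PySem.List.pyRange 1 ((n' : Int) + 1) 1).foldl
      (fun total j => if PySem.Int.mod (n' : Int) j == 0 then
          total + mobiusA (PySem.Int.floordiv (n' : Int) j) * d ^ j.toNat
        else total) 0
    = ∑ j ∈ n'.divisors, ArithmeticFunction.moebius (n' / j) * d ^ j := by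
  rw [PySem.List.pyRange_one]
  have h1 : (((n' : Int) + 1) - 1).toNat = n' := by omega
  rw [h1, List.foldl_map]
  have hstep : ∀ (init : Int) (l : List Nat),
      l.foldl (fun (total : Int) (k : Nat) =>
        if PySem.Int.mod (n' : Int) ((1 : Int) + k) == 0 then
          total + mobiusA (PySem.Int.floordiv (n' : Int) ((1 : Int) + k)) * d ^ ((1 : Int) + k).toNat
        else total) init
      = init + (l.map (fun k =>
          if (1 + k) ∣ n' then ArithmeticFunction.moebius (n' / (1 + k)) * d ^ (1 + k) else 0)).sum := by
    intro init l
    induction l generalizing init with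
    | nil => simp
    | cons k t iht =>
      rw [List.foldl_cons, List.map_cons, List.sum_cons, iht]
      have hcast : ((1 : Int) + k) = ((1 + k : Nat) : Int) := by push_cast; ring
      by_cases hdvd : (1 + k) ∣ n'
      · rw [if_pos (by rw [hcast, PySem.Int.mod_natCast, Nat.mod_eq_zero_of_dvd hdvd]; rfl),
          if_pos hdvd]
        have hq : 1 ≤ n' / (1 + k) := Nat.one_le_div_iff (by omega) |>.2 (Nat.le_of_dvd (by omega) hdvd)
        rw [hcast, PySem.Int.floordiv_natCast, mobiusA_spec _ hq, Int.toNat_natCast]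
        ring
      · have h0 : n' % (1 + k) ≠ 0 := fun h => hdvd (Nat.dvd_of_mod_eq_zero h)
        rw [if_neg (by rw [hcast, PySem.Int.mod_natCast]; simp only [beq_iff_eq, Int.natCast_eq_zero]; exact h0),
          if_neg hdvd]
        ring
  rw [hstep, zero_add]
  have h2 : ((List.range n').map (fun k =>
      if (1 + k) ∣ n' then ArithmeticFunction.moebius (n' / (1 + k)) * d ^ (1 + k) else 0)).sum
      = ∑ k ∈ Finset.range n', (if (1 + k) ∣ n' then ArithmeticFunction.moebius (n' / (1 + k)) * d ^ (1 + k) else 0) := rfl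
  rw [h2, Nat.divisors, Finset.sum_filter, Finset.sum_Ico_eq_sum_range]
  simp only [Nat.add_sub_cancel]

-- the Moebius-weighted divisor sum as an inclusion-exclusion sum over subsets of prime factors
theorem sumA_powerset (n' : Nat) (hn : 1 ≤ n') (d : Int) :
    ∑ j ∈ n'.divisors, ArithmeticFunction.moebius (n' / j) * d ^ j
      = ∑ T ∈ n'.primeFactors.powerset, (-1 : Int) ^ T.card * d ^ (n' / ∏ x ∈ T, x) := by
  have h1 : ∑ j ∈ n'.divisors, ArithmeticFunction.moebius (n' / j) * d ^ j
      = ∑ j ∈ n'.divisors, ArithmeticFunction.moebius j * d ^ (n' / j) := by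
    rw [← Nat.sum_div_divisors n' (fun j => ArithmeticFunction.moebius j * d ^ (n' / j))]
    apply Finset.sum_congr rfl
    intro j hj
    obtain ⟨hdvd, h0⟩ := Nat.mem_divisors.1 hj
    rw [Nat.div_div_self hdvd h0]
  have h2 : ∑ j ∈ n'.divisors, ArithmeticFunction.moebius j * d ^ (n' / j)
      = ∑ j ∈ n'.divisors with Squarefree j, ArithmeticFunction.moebius j * d ^ (n' / j) := by
    rw [Finset.sum_filter_of_ne]
    intro x hx hne
    by_contra hns
    rw [ArithmeticFunction.moebius_eq_zero_of_not_squarefree hns, zero_mul] at hne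
    exact hne rfl
  rw [h1, h2, Nat.sum_divisors_filter_squarefree (by omega)]
  have hfac : (UniqueFactorizationMonoid.normalizedFactors n').toFinset = n'.primeFactors := by
    rw [Nat.factors_eq]
    simp
  rw [hfac]
  apply Finset.sum_congr rfl
  intro T hT
  have hprod : T.val.prod = ∏ x ∈ T, x := by
    rw [Finset.prod_eq_multiset_prod, Multiset.map_id']
  rw [hprod, moebius_prod_primes T
    (fun p hp => Nat.prime_of_mem_primeFactors (Finset.mem_powerset.1 hT hp))]

-- ===== VERDICT (by name: the statement is the Claim_ definition above) =====
theorem necklace_polynomial_spec : Claim_equal_necklace_polynomial := by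
  intro n d _
  unfold Spec_necklace_polynomial necklace_polynomial necklace_polynomial_alt
  by_cases h0 : n = 0
  · simp [h0]
  · by_cases h1 : n = 1
    · simp [h1]
    · have g0 : (n == 0) = false := by simpa using h0
      have g1 : (n == 1) = false := by simpa using h1
      simp only [g0, g1, Bool.false_eq_true, if_false]
      by_cases hneg : n < 0
      · rw [if_pos hneg, PySem.List.pyRange_one_eq_nil (by omega), List.foldl_nil]
        simp [PySem.Int.floordiv]
      · rw [if_neg hneg]
        -- here n ≥ 2
        lift n to Nat using (by omega) with n'
        have hn0 : n' ≠ 0 := by exact_mod_cast h0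
        have hn1 : n' ≠ 1 := by exact_mod_cast h1
        have hn2 : 2 ≤ n' := by omega
        obtain ⟨qs, mf, heq, hpw, hqprime, hfin⟩ :=
          factorLoop_spec (n' + 2) n' 2 [] (by omega) (by omega)
            (fun q hq _ => hq.two_le) (by omega) (by omega)
        have htn : ((n' : Int)).toNat = n' := Int.toNat_natCast n'
        norm_num at heq
        rw [htn, heq]
        dsimp only [List.nil_append]
        -- the combined prime list of B
        set Pfull : List Nat := qs ++ (if 1 < mf then [mf] else []) with hPfull
        have hprimes : (if 1 < ((mf : Nat) : Int) then qs.map (Nat.cast : Nat → Int) ++ [((mf : Nat) : Int)]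
              else qs.map (Nat.cast : Nat → Int)) = Pfull.map (Nat.cast : Nat → Int) := by
          by_cases hmf : 1 < mf
          · rw [if_pos (by exact_mod_cast hmf), hPfull, if_pos hmf]
            simp
          · rw [if_neg (by exact_mod_cast hmf), hPfull, if_neg hmf]
            simp
        rw [hprimes, termsFold_eq, List.map_map]
        have hnd : Pfull.Nodup := hpw.imp ne_of_lt
        have hmapeq : List.map ((fun sq : Int × Int => sq.1 * d ^ (PySem.Int.floordiv (n' : Int) sq.2).toNat)
              ∘ fun S : List Nat => ((-1 : Int) ^ S.length, (S.prod : Int))) Pfull.sublists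
            = List.map (fun S : List Nat => (-1 : Int) ^ S.length * d ^ (n' / S.prod)) Pfull.sublists := by
          apply List.map_congr_left
          intro S hS
          simp only [Function.comp_apply]
          rw [PySem.Int.floordiv_natCast, Int.toNat_natCast]
        rw [hmapeq,
          sum_sublists_eq_powerset Pfull hnd (fun c q => (-1 : Int) ^ c * d ^ (n' / q)),
          hfin, totalA_eq n' (by omega) d, sumA_powerset n' (by omega) d]
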